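-- pv_equiv track=rewrite | github.com/JoaquinCampo/kvguard | src/kvguard/detectors.py | detect_looping
-- ===== SOURCE A (Python) =====
-- def detect_looping(token_ids: list[int], window_size: int = 20, min_repeats: int = 3) -> bool:
--     """Detect repeated token windows in the output.
--
--     Returns True if any window of `window_size` tokens appears >= `min_repeats` times.
--     """
--     if len(token_ids) < window_size * min_repeats:
--         return False
--
--     window_counts: dict[tuple[int, ...], int] = {}
--     for i in range(len(token_ids) - window_size + 1):
--         window = tuple(token_ids[i : i + window_size])
--         window_counts[window] = window_counts.get(window, 0) + 1
--         if window_counts[window] >= min_repeats: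
--             return True
--     return False
-- ===== SOURCE B (Python) =====
-- def detect_looping(token_ids: list[int], window_size: int = 20, min_repeats: int = 3) -> bool:
--     """Detect repeated token windows via sort-then-scan of adjacent runs."""
--     if window_size < 0:
--         raise ValueError("window_size must be non-negative")
--     if len(token_ids) < window_size * min_repeats:
--         return False
--     windows = [tuple(token_ids[i:i + window_size])
--                for i in range(len(token_ids) - window_size + 1)]
--     windows.sort()
--     prev = None
--     run = 0
--     for w in windows:
--         if w == prev:
--             run += 1
--         else:
--             prev = w
--             run = 1
--         if run >= min_repeats:
--             return True
--     return False
-- ===== Notes on version B (the rewrite author's own statement) =====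
-- stated objective: alternative
-- what changed: Replaces A's dict-based window counting with early exit by materialising all windows, sorting them, and scanning the sorted list for a run of min_repeats identical adjacent windows; B validates its arguments and raises ValueError on negative window_size (outside the natural domain of fixed-size token windows, where A iterates over len+|window_size|+1 degenerate clamped slices), so Pre_ excludes window_size < 0.
-- outside the precondition, e.g. on detect_looping([4, -3, -1000000], -2147483647, 1): A returns True, B raises ValueError; on detect_looping([1, 2, 1, 2], -1, 1): A returns True, B raises ValueError
import Mathlib
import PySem

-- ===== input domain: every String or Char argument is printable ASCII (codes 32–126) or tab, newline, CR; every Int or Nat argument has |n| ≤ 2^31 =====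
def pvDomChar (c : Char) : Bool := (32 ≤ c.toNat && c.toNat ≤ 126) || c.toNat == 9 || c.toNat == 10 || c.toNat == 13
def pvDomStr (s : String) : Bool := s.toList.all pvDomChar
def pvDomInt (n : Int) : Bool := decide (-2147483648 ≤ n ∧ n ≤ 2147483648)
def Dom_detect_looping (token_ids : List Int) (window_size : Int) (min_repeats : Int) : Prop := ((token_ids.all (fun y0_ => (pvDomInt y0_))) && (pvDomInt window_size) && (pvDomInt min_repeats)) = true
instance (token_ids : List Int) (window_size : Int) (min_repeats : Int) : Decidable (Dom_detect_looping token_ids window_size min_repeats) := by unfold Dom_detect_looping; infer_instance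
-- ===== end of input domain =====

-- B replaces A's hash-counting loop with an early exit by sort-then-scan of adjacent runs
-- (alternative decomposition, not claimed faster); both keep A's early length guard.

-- ===== PORT A =====
-- tuple(token_ids[i : i + window_size])
def pvWin (token_ids : List Int) (window_size i : Int) : List Int :=
  PySem.List.slice token_ids (some i) (some (i + window_size))

-- the counting loop of A over i in range(len - w + 1) (the range consumed lazily, as
-- Python's range is): window_counts[w] = window_counts.get(w, 0) + 1; early return on >= min_repeats
def pvALoop (token_ids : List Int) (window_size min_repeats : Int)
    (i stop : Int) (d : PySem.Dict (List Int) Int) : Bool :=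
  if _h : i < stop then
    if min_repeats ≤ (d.insert (pvWin token_ids window_size i)
          (d.getD (pvWin token_ids window_size i) 0 + 1)).getD (pvWin token_ids window_size i) 0
    then true
    else pvALoop token_ids window_size min_repeats (i + 1) stop
          (d.insert (pvWin token_ids window_size i) (d.getD (pvWin token_ids window_size i) 0 + 1))
  else false
termination_by (stop - i).toNat
decreasing_by omega

def detect_looping (token_ids : List Int) (window_size : Int) (min_repeats : Int) : Bool :=
  if (token_ids.length : Int) < window_size * min_repeats then false
  else
    pvALoop token_ids window_size min_repeats
      0 ((token_ids.length : Int) - window_size + 1)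
      PySem.Dict.empty

-- ===== PORT B =====
-- the run-scanning loop of B over the sorted window list (prev = None initially)
def pvBScan (min_repeats : Int) : Option (List Int) → Int → List (List Int) → Bool
  | _, _, [] => false
  | prev, run, w :: rest =>
      if some w = prev then
        if min_repeats ≤ run + 1 then true else pvBScan min_repeats prev (run + 1) rest
      else
        if min_repeats ≤ 1 then true else pvBScan min_repeats (some w) 1 rest

def detect_looping_alt (token_ids : List Int) (window_size : Int) (min_repeats : Int) : Bool :=
  -- Source B raises ValueError for window_size < 0; unreachable under Pre_detect_looping
  -- (0 ≤ window_size), so this branch carries a placeholder value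
  if window_size < 0 then false
  else if (token_ids.length : Int) < window_size * min_repeats then false
  else
    pvBScan min_repeats none 0
      (PySem.List.sorted
        ((PySem.List.pyRange 0 ((token_ids.length : Int) - window_size + 1) 1).map
          (pvWin token_ids window_size))
        (fun w => w) false)

-- ===== PRECONDITION & SPEC =====
-- Pre_ excludes negative window_size, outside the natural domain of fixed-size token
-- windows: there A enumerates len+|window_size|+1 degenerate clamped slices, while B
-- validates its arguments and raises ValueError.
def Pre_detect_looping (token_ids : List Int) (window_size : Int) (min_repeats : Int) : Prop :=
  0 ≤ window_size
instance (token_ids : List Int) (window_size : Int) (min_repeats : Int) : Decidable (Pre_detect_looping token_ids window_size min_repeats) := by unfold Pre_detect_looping; infer_instance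
def pvWitness_detect_looping : List Int × Int × Int := ([1, 1, 1], 1, 3)
def Spec_detect_looping (token_ids : List Int) (window_size : Int) (min_repeats : Int) (out : Bool) : Prop := out = detect_looping_alt token_ids window_size min_repeats
instance (token_ids : List Int) (window_size : Int) (min_repeats : Int) (out : Bool) : Decidable (Spec_detect_looping token_ids window_size min_repeats out) := by unfold Spec_detect_looping; infer_instance

-- ===== CLAIM (what is proved, stated in full; the proofs are below) =====
def Claim_equal_detect_looping : Prop := ∀ (token_ids : List Int) (window_size : Int) (min_repeats : Int), Dom_detect_looping token_ids window_size min_repeats → Pre_detect_looping token_ids window_size min_repeats → Spec_detect_looping token_ids window_size min_repeats (detect_looping token_ids window_size min_repeats)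

-- ===== LEMMAS AND PROOFS =====

-- A's loop fires iff some window of the remaining index list reaches min_repeats,
-- counting what the dict already holds for it.
lemma pvALoop_true_iff (tids : List Int) (ws mr : Int) :
    ∀ (i stop : Int) (d : PySem.Dict (List Int) Int),
      (pvALoop tids ws mr i stop d = true ↔
        ∃ w ∈ (PySem.List.pyRange i stop 1).map (pvWin tids ws),
          mr ≤ d.getD w 0 + (((PySem.List.pyRange i stop 1).map (pvWin tids ws)).count w : Int)) := by
  intro i stop d
  obtain ⟨n, hn⟩ : ∃ n, (stop - i).toNat = n := ⟨_, rfl⟩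
  revert hn
  induction n generalizing i d with
  | zero =>
    intro hn
    rw [pvALoop, dif_neg (by omega : ¬ i < stop),
        PySem.List.pyRange_one_eq_nil (by omega : stop ≤ i)]
    simp
  | succ n ihn =>
    intro hn
    have hlt : i < stop := by omega
    rw [pvALoop, dif_pos hlt, PySem.List.pyRange_one_cons hlt, List.map_cons]
    have hins : ∀ w, (d.insert (pvWin tids ws i) (d.getD (pvWin tids ws i) 0 + 1)).getD w 0
        = if w = pvWin tids ws i then d.getD (pvWin tids ws i) 0 + 1 else d.getD w 0 :=
      fun w => PySem.Dict.getD_insert d _ w _ 0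
    rw [hins (pvWin tids ws i), if_pos rfl]
    have hc0 : (pvWin tids ws i :: (PySem.List.pyRange (i + 1) stop 1).map (pvWin tids ws)).count (pvWin tids ws i)
        = ((PySem.List.pyRange (i + 1) stop 1).map (pvWin tids ws)).count (pvWin tids ws i) + 1 :=
      List.count_cons_self
    by_cases h : mr ≤ d.getD (pvWin tids ws i) 0 + 1
    · rw [if_pos h]
      simp only [true_iff]
      exact ⟨pvWin tids ws i, by simp, by omega⟩
    · rw [if_neg h,
          ihn (i + 1) (d.insert (pvWin tids ws i) (d.getD (pvWin tids ws i) 0 + 1)) (by omega)]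
      constructor
      · rintro ⟨w, hw, hle⟩
        rw [hins w] at hle
        by_cases hwe : w = pvWin tids ws i
        · rw [hwe] at hle
          rw [if_pos rfl] at hle
          exact ⟨pvWin tids ws i, by simp, by omega⟩
        · rw [if_neg hwe] at hle
          exact ⟨w, by simp [hw], by rwa [List.count_cons_of_ne (Ne.symm hwe)]⟩
      · rintro ⟨w, hw, hle⟩
        by_cases hwe : w = pvWin tids ws i
        · rw [hwe] at hle
          have hR : pvWin tids ws i ∈ (PySem.List.pyRange (i + 1) stop 1).map (pvWin tids ws) := by
            by_contra hnot
            have hz : ((PySem.List.pyRange (i + 1) stop 1).map (pvWin tids ws)).count (pvWin tids ws i) = 0 :=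
              List.count_eq_zero.mpr hnot
            omega
          exact ⟨pvWin tids ws i, hR, by rw [hins (pvWin tids ws i), if_pos rfl]; omega⟩
        · have hwr : w ∈ (PySem.List.pyRange (i + 1) stop 1).map (pvWin tids ws) := by
            rcases List.mem_cons.mp hw with h' | h'
            · exact absurd h' hwe
            · exact h'
          rw [List.count_cons_of_ne (Ne.symm hwe)] at hle
          exact ⟨w, hwr, by rw [hins w, if_neg hwe]; exact hle⟩

-- B's scanner with a live previous element, on a sorted tail.
lemma pvBScan_some_iff (mr : Int) :
    ∀ (l : List (List Int)) (p : List Int) (run : Int),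
      (p :: l).Pairwise (· ≤ ·) → run < mr →
      (pvBScan mr (some p) run l = true ↔
        mr ≤ run + (l.count p : Int) ∨ ∃ w ∈ l, w ≠ p ∧ mr ≤ (l.count w : Int)) := by
  intro l
  induction l with
  | nil => intro p run _ hrun; simp [pvBScan]; omega
  | cons x rest ih =>
    intro p run hpw hrun
    have hpx : p ≤ x := (List.pairwise_cons.mp hpw).1 x (by simp)
    have hxw : (x :: rest).Pairwise (· ≤ ·) := (List.pairwise_cons.mp hpw).2
    have hcx : (x :: rest).count x = rest.count x + 1 := List.count_cons_self
    by_cases hxp : x = p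
    · subst hxp
      simp only [pvBScan, if_true]
      by_cases h1 : mr ≤ run + 1
      · rw [if_pos h1]
        simp only [true_iff]
        left; omega
      · rw [if_neg h1, ih x (run + 1) hxw (by omega)]
        constructor
        · rintro (h | ⟨w, hw, hne, hle⟩)
          · left; omega
          · exact Or.inr ⟨w, by simp [hw], hne, by rwa [List.count_cons_of_ne (Ne.symm hne)]⟩
        · rintro (h | ⟨w, hw, hne, hle⟩)
          · left; omega
          · have hwr : w ∈ rest := by
              rcases List.mem_cons.mp hw with h' | h'
              · exact absurd h' hne
              · exact h'
            exact Or.inr ⟨w, hwr, hne, by rwa [List.count_cons_of_ne (Ne.symm hne)] at hle⟩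
    · have hpx' : p < x := lt_of_le_of_ne hpx (Ne.symm hxp)
      have hpnr : p ∉ rest := fun hm =>
        absurd ((List.pairwise_cons.mp hxw).1 p hm) (not_le.mpr hpx')
      have hcp : (x :: rest).count p = 0 :=
        List.count_eq_zero.mpr (by simp [hpnr, Ne.symm hxp])
      simp only [pvBScan, if_neg (show ¬ ((some x : Option (List Int)) = some p) by simpa using hxp)]
      by_cases h1 : mr ≤ 1
      · rw [if_pos h1]
        simp only [true_iff]
        exact Or.inr ⟨x, by simp, hxp, by omega⟩
      · rw [if_neg h1, ih x 1 hxw (by omega)]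
        constructor
        · rintro (h | ⟨w, hw, hne, hle⟩)
          · exact Or.inr ⟨x, by simp, hxp, by omega⟩
          · have hwp : w ≠ p := fun he => hpnr (he ▸ hw)
            exact Or.inr ⟨w, by simp [hw], hwp, by rwa [List.count_cons_of_ne (Ne.symm hne)]⟩
        · rintro (h | ⟨w, hw, hwp, hle⟩)
          · rw [hcp] at h; exact absurd h (by omega)
          · by_cases hwx : w = x
            · subst hwx; left; omega
            · have hwr : w ∈ rest := by
                rcases List.mem_cons.mp hw with h' | h'
                · exact absurd h' hwx
                · exact h'
              exact Or.inr ⟨w, hwr, hwx, by rwa [List.count_cons_of_ne (Ne.symm hwx)] at hle⟩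

-- B's scanner from the initial (None, 0) state, on a sorted list.
lemma pvBScan_none_iff (mr : Int) (l : List (List Int)) (hs : l.Pairwise (· ≤ ·)) :
    (pvBScan mr none 0 l = true ↔ ∃ w ∈ l, mr ≤ (l.count w : Int)) := by
  cases l with
  | nil => simp [pvBScan]
  | cons x rest =>
    simp only [pvBScan, if_neg (show ¬ ((some x : Option (List Int)) = none) by simp)]
    have hcx : (x :: rest).count x = rest.count x + 1 := List.count_cons_self
    by_cases h1 : mr ≤ 1
    · rw [if_pos h1]
      simp only [true_iff]
      exact ⟨x, by simp, by omega⟩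
    · rw [if_neg h1, pvBScan_some_iff mr rest x 1 hs (by omega)]
      constructor
      · rintro (h | ⟨w, hw, hne, hle⟩)
        · exact ⟨x, by simp, by omega⟩
        · exact ⟨w, by simp [hw], by rwa [List.count_cons_of_ne (Ne.symm hne)]⟩
      · rintro ⟨w, hw, hle⟩
        by_cases hwx : w = x
        · subst hwx; left; omega
        · have hwr : w ∈ rest := by
            rcases List.mem_cons.mp hw with h' | h'
            · exact absurd h' hwx
            · exact h'
          exact Or.inr ⟨w, hwr, hwx, by rwa [List.count_cons_of_ne (Ne.symm hwx)] at hle⟩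

lemma getD_empty_int (w : List Int) :
    (PySem.Dict.empty : PySem.Dict (List Int) Int).getD w 0 = 0 := rfl

-- proof-side view of B's sort, with the LinearOrder-derived comparison instances
def pvSortedLO {κ : Type} [LinearOrder κ] (xs : List κ) : List κ :=
  PySem.List.sorted xs (fun w => w) false

lemma pvSortedLO_pairwise {κ : Type} [LinearOrder κ] (xs : List κ) :
    (pvSortedLO xs).Pairwise (· ≤ ·) :=
  PySem.List.sorted_pairwise xs (fun w => w)

-- two comparison-instance flavours deciding the same order sort identically
lemma sorted_id_congr_inst {κ : Type} (i1 i2 : LT κ)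
    (d1 : DecidableRel (@LT.lt κ i1)) (d2 : DecidableRel (@LT.lt κ i2))
    (h : ∀ a b, @LT.lt κ i1 a b ↔ @LT.lt κ i2 a b) (xs : List κ) :
    @PySem.List.sorted κ κ i1 d1 xs (fun w => w) false
      = @PySem.List.sorted κ κ i2 d2 xs (fun w => w) false := by
  rw [@PySem.List.sorted_eq_foldl_insertBy κ κ i1 d1,
      @PySem.List.sorted_eq_foldl_insertBy κ κ i2 d2]
  congr 1
  funext acc x
  congr 1
  funext a b
  exact decide_eq_decide.mpr (h a b)

-- the two instance flavours decide the same lexicographic order, so the sorts agree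
lemma pvSortedLO_eq (xs : List (List Int)) :
    pvSortedLO xs = PySem.List.sorted xs (fun w => w) false := by
  unfold pvSortedLO
  exact sorted_id_congr_inst _ _ _ _ (fun a b => (List.lt_iff_lex_lt a b).symm) xs

-- ===== VERDICT (by name: the statement is the Claim_ definition above) =====
theorem detect_looping_spec : Claim_equal_detect_looping := by
  intro tids ws mr _ hpre
  have hws : 0 ≤ ws := hpre
  show detect_looping tids ws mr = detect_looping_alt tids ws mr
  unfold detect_looping detect_looping_alt
  rw [if_neg (not_lt.mpr hws)]
  by_cases hg : (tids.length : Int) < ws * mr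
  · rw [if_pos hg, if_pos hg]
  · rw [if_neg hg, if_neg hg, Bool.eq_iff_iff]
    have hperm :
        (PySem.List.sorted
            ((PySem.List.pyRange 0 ((tids.length : Int) - ws + 1) 1).map (pvWin tids ws))
            (fun w => w) false).Perm
          ((PySem.List.pyRange 0 ((tids.length : Int) - ws + 1) 1).map (pvWin tids ws)) :=
      PySem.List.sorted_perm _ _ _
    have hsorted :
        (PySem.List.sorted
            ((PySem.List.pyRange 0 ((tids.length : Int) - ws + 1) 1).map (pvWin tids ws))
            (fun w => w) false).Pairwise (· ≤ ·) := by
      rw [← pvSortedLO_eq]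
      exact pvSortedLO_pairwise _
    have hB := pvBScan_none_iff mr
      (PySem.List.sorted
        ((PySem.List.pyRange 0 ((tids.length : Int) - ws + 1) 1).map (pvWin tids ws))
        (fun w => w) false) hsorted
    have hA := pvALoop_true_iff tids ws mr
      0 ((tids.length : Int) - ws + 1) PySem.Dict.empty
    rw [hA, hB]
    constructor
    · rintro ⟨w, hw, hle⟩
      rw [getD_empty_int] at hle
      refine ⟨w, hperm.mem_iff.mpr hw, ?_⟩
      rw [hperm.count_eq]
      omega
    · rintro ⟨w, hw, hle⟩
      rw [hperm.count_eq] at hle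
      refine ⟨w, hperm.mem_iff.mp hw, ?_⟩
      rw [getD_empty_int]
      omega
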